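-- pv_equiv track=rewrite | github.com/junbeom-kang/Baekjoon | String/14425문자열 집합.py | solution
-- ===== SOURCE A (Python) =====
-- def add(trie,text):
--     cur=trie
--     for i in text:
--         if i not in cur:
--             cur[i]={}
--         cur=cur[i]
--     cur['*']={}
--
-- def search(trie,sample):
--     cur=trie
--     for i in sample:
--         if i not in cur:
--             return False
--         else:
--             cur=cur[i]
--     if '*' in cur:
--         return True
--     else:
--         return False
--
-- def solution(n,m,text,sample):
--     trie={}
--     cnt=0
--     for i in range(n):
--         add(trie,text[i])
--     for i in range(m):
--         if search(trie,sample[i]):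
--             cnt+=1
--     return cnt
-- ===== SOURCE B (Python) =====
-- def solution(n, m, text, sample):
--     s = {text[i] for i in range(n)}
--     return sum(1 for j in range(m) if sample[j] in s)
-- ===== Notes on version B (the rewrite author's own statement) =====
-- stated objective: simpler
-- what changed: Replaces the hand-rolled trie (nested dicts with a '*' end-marker and per-character add/search loops) by a single hash set of the first n text strings and a direct whole-string membership count over the first m samples.
-- outside the precondition, e.g. on solution(1, 1, ['a*'], ['a']): A returns 1, B returns 0; on solution(2, 1, ['a*b', 'a'], ['a*b']): A returns 0, B returns 1
import Mathlib
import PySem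

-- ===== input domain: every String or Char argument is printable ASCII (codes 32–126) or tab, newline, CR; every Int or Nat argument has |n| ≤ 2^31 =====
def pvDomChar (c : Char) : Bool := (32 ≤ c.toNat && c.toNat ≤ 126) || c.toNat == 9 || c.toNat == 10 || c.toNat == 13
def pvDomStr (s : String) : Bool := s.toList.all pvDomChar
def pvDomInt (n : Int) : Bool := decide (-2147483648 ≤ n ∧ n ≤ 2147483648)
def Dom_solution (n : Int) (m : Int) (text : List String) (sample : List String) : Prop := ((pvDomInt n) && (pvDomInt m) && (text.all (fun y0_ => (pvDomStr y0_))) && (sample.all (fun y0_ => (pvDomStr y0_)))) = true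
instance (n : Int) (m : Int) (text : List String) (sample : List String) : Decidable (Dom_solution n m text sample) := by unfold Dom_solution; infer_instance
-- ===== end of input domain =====

-- B replaces A's hand-rolled trie (nested dicts with a '*' end-marker, per-character add/search
-- walks) by a plain set of the first n text strings and a direct membership count (objective: simpler).

-- ===== PORT A =====
-- A's nested dicts {Char → dict} are encoded first-child/next-sibling (no nested inductive):
-- `nil` is the empty dict {}, `node c ch sib` is an entry c ↦ ch followed by the rest of the dict.
inductive PTrie : Type
  | nil : PTrie
  | node : Char → PTrie → PTrie → PTrie
deriving DecidableEq, Repr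

-- `cur[c]` / `c in cur` lookup in the encoded dict
def pvLookup : PTrie → Char → Option PTrie
  | PTrie.nil, _ => none
  | PTrie.node c' ch sib, c => if c' = c then some ch else pvLookup sib c

-- `cur[c] = v` (overwrite in place keeps position; new keys append), as in a Python dict
def pvSet : PTrie → Char → PTrie → PTrie
  | PTrie.nil, c, v => PTrie.node c v PTrie.nil
  | PTrie.node c' ch sib, c, v =>
      if c' = c then PTrie.node c' v sib else PTrie.node c' ch (pvSet sib c v)

-- add(trie, text): walk the characters, inserting {} where absent, then cur['*'] = {}
-- (Python mutates `cur` in place; functionally this is the same update along the same path)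
def pvAdd : PTrie → List Char → PTrie
  | t, [] => pvSet t '*' PTrie.nil
  | t, c :: cs =>
      let child := (pvLookup t c).getD PTrie.nil   -- `if c not in cur: cur[c] = {}` then descend
      pvSet t c (pvAdd child cs)

-- search(trie, sample)
def pvSearch : PTrie → List Char → Bool
  | t, [] => (pvLookup t '*').isSome
  | t, c :: cs =>
      match pvLookup t c with
      | none => false
      | some ch => pvSearch ch cs

def solution (n : Int) (m : Int) (text : List String) (sample : List String) : Int :=
  let trie := (PySem.List.pyRange 0 n 1).foldl
      (fun t i => pvAdd t (PySem.List.pyGetD text i "").toList) PTrie.nil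
  (PySem.List.pyRange 0 m 1).foldl
      (fun cnt j => if pvSearch trie (PySem.List.pyGetD sample j "").toList then cnt + 1 else cnt) 0

-- ===== PORT B =====
def solution_alt (n : Int) (m : Int) (text : List String) (sample : List String) : Int :=
  let s : PySem.Set String :=
    PySem.Set.ofList ((PySem.List.pyRange 0 n 1).map (fun i => PySem.List.pyGetD text i ""))
  (PySem.List.pyRange 0 m 1).foldl
      (fun acc j => acc + (if PySem.Set.contains s (PySem.List.pyGetD sample j "") then 1 else 0)) 0

-- ===== PRECONDITION & SPEC =====
-- Pre_ excludes (a) n > len(text) or m > len(sample), where A raises IndexError, and (b) inputs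
-- where one of the first n text strings contains '*' — the character A reserves as the trie's
-- end-of-word sentinel, so such strings collide with the marker and A's answers there are an
-- artefact of that encoding (B does plain whole-string set membership). Samples may contain '*'.
def Pre_solution (n : Int) (m : Int) (text : List String) (sample : List String) : Prop :=
  n ≤ (text.length : Int) ∧ m ≤ (sample.length : Int) ∧
  ((text.take n.toNat).all (fun s => !(s.toList.contains '*'))) = true
instance (n : Int) (m : Int) (text : List String) (sample : List String) : Decidable (Pre_solution n m text sample) := by unfold Pre_solution; infer_instance

def pvWitness_solution : Int × Int × List String × List String := (2, 3, ["ab", "cd"], ["cd", "x*", "ab"])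

def Spec_solution (n : Int) (m : Int) (text : List String) (sample : List String) (out : Int) : Prop := out = solution_alt n m text sample
instance (n : Int) (m : Int) (text : List String) (sample : List String) (out : Int) : Decidable (Spec_solution n m text sample out) := by unfold Spec_solution; infer_instance

-- ===== CLAIM (what is proved, stated in full; the proofs are below) =====
def Claim_equal_solution : Prop := ∀ (n : Int) (m : Int) (text : List String) (sample : List String), Dom_solution n m text sample → Pre_solution n m text sample → Spec_solution n m text sample (solution n m text sample)

-- ===== LEMMAS AND PROOFS =====

-- A trie is clean if every '*' entry is a bare marker (empty child).
def pvClean : PTrie → Prop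
  | PTrie.nil => True
  | PTrie.node c ch sib => (c = '*' → ch = PTrie.nil) ∧ pvClean ch ∧ pvClean sib

theorem pvLookup_pvSet (t : PTrie) (k c : Char) (v : PTrie) :
    pvLookup (pvSet t k v) c = if c = k then some v else pvLookup t c := by
  induction t with
  | nil =>
      simp only [pvSet, pvLookup]
      by_cases h : c = k
      · simp [h]
      · rw [if_neg (fun hh => h hh.symm), if_neg h]
  | node c' ch sib ihc ihs =>
      simp only [pvSet]
      by_cases h1 : c' = k
      · subst h1
        rw [if_pos rfl]
        simp only [pvLookup]
        by_cases h2 : c' = c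
        · subst h2; simp
        · simp only [if_neg h2, if_neg (show ¬ c = c' from fun hh => h2 hh.symm)]
      · rw [if_neg h1]
        simp only [pvLookup]
        by_cases h2 : c' = c
        · subst h2; simp [h1]
        · simp [h2, ihs]

theorem pvSearch_nil (s : List Char) : pvSearch PTrie.nil s = false := by
  cases s <;> simp [pvSearch, pvLookup]

theorem pvSearch_cons_some {t : PTrie} {c : Char} {ch : PTrie} (h : pvLookup t c = some ch)
    (cs : List Char) : pvSearch t (c :: cs) = pvSearch ch cs := by
  simp [pvSearch, h]

theorem pvSearch_cons_none {t : PTrie} {c : Char} (h : pvLookup t c = none)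
    (cs : List Char) : pvSearch t (c :: cs) = false := by
  simp [pvSearch, h]

theorem pvClean_lookup {t : PTrie} (h : pvClean t) (c : Char) :
    ∀ ch, pvLookup t c = some ch → pvClean ch ∧ (c = '*' → ch = PTrie.nil) := by
  induction t with
  | nil => intro ch hch; simp [pvLookup] at hch
  | node c' ch' sib ihc ihs =>
      intro ch hch
      obtain ⟨hm, hc, hs⟩ := h
      simp only [pvLookup] at hch
      by_cases he : c' = c
      · simp [he] at hch; subst hch
        exact ⟨hc, fun h' => hm (by rw [he, h'])⟩
      · simp [he] at hch; exact ihs hs ch hch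

theorem pvClean_pvSet {t v : PTrie} (ht : pvClean t) (hv : pvClean v) (c : Char)
    (hm : c = '*' → v = PTrie.nil) : pvClean (pvSet t c v) := by
  induction t with
  | nil => exact ⟨hm, hv, trivial⟩
  | node c' ch sib ihc ihs =>
      obtain ⟨h1, h2, h3⟩ := ht
      simp only [pvSet]
      by_cases he : c' = c
      · subst he
        rw [if_pos rfl]
        exact ⟨fun hh => hm hh, hv, h3⟩
      · rw [if_neg he]
        exact ⟨h1, h2, ihs h3⟩

theorem pvClean_child {t : PTrie} (ht : pvClean t) (c : Char) :
    pvClean ((pvLookup t c).getD PTrie.nil) := by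
  cases hl : pvLookup t c with
  | none => trivial
  | some ch => exact (pvClean_lookup ht c ch hl).1

theorem pvClean_pvAdd {t : PTrie} (ht : pvClean t) {w : List Char} (hw : '*' ∉ w) :
    pvClean (pvAdd t w) := by
  induction w generalizing t with
  | nil => exact pvClean_pvSet ht (show pvClean PTrie.nil from trivial) '*' (fun _ => rfl)
  | cons c cs ih =>
      simp only [pvAdd]
      have hc : c ≠ '*' := fun h => hw (by simp [h])
      exact pvClean_pvSet ht (ih (pvClean_child ht c) (fun h => hw (List.mem_cons_of_mem _ h))) c
        (fun h => absurd h hc)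

-- key lemma: adding a '*'-free word to a clean trie adds exactly that word to the search set
theorem pvSearch_pvAdd {t : PTrie} (ht : pvClean t) {w : List Char} (hw : '*' ∉ w)
    (s : List Char) : pvSearch (pvAdd t w) s = (decide (s = w) || pvSearch t s) := by
  induction w generalizing t s with
  | nil =>
      cases s with
      | nil =>
          have hl : pvLookup (pvSet t '*' PTrie.nil) '*' = some PTrie.nil := by
            rw [pvLookup_pvSet]; simp
          simp [pvAdd, pvSearch, hl]
      | cons c cs =>
          simp only [pvAdd]
          by_cases hc : c = '*'
          · subst hc
            have hl : pvLookup (pvSet t '*' PTrie.nil) '*' = some PTrie.nil := by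
              rw [pvLookup_pvSet]; simp
            rw [pvSearch_cons_some hl]
            cases hl2 : pvLookup t '*' with
            | none => simp [pvSearch_nil, pvSearch_cons_none hl2]
            | some ch =>
                have := (pvClean_lookup ht '*' ch hl2).2 rfl
                subst this
                simp [pvSearch_nil, pvSearch_cons_some hl2]
          · have hl : pvLookup (pvSet t '*' PTrie.nil) c = pvLookup t c := by
              rw [pvLookup_pvSet, if_neg hc]
            cases hl2 : pvLookup t c with
            | none =>
                rw [pvSearch_cons_none (hl.trans hl2), pvSearch_cons_none hl2]
                simp
            | some ch =>
                rw [pvSearch_cons_some (hl.trans hl2), pvSearch_cons_some hl2]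
                simp
  | cons a w' ih =>
      have ha : a ≠ '*' := fun h => hw (by simp [h])
      have hw' : '*' ∉ w' := fun h => hw (List.mem_cons_of_mem _ h)
      cases s with
      | nil =>
          simp only [pvAdd, pvSearch]
          rw [pvLookup_pvSet, if_neg (Ne.symm ha)]
          simp
      | cons c cs =>
          simp only [pvAdd]
          by_cases hc : c = a
          · subst hc
            have hl : pvLookup (pvSet t c (pvAdd ((pvLookup t c).getD PTrie.nil) w')) c
                = some (pvAdd ((pvLookup t c).getD PTrie.nil) w') := by
              rw [pvLookup_pvSet]; simp
            rw [pvSearch_cons_some hl, ih (pvClean_child ht c) hw']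
            cases hl2 : pvLookup t c with
            | none => simp [pvSearch_nil, pvSearch_cons_none hl2]
            | some ch => simp [pvSearch_cons_some hl2]
          · have hl : pvLookup (pvSet t a (pvAdd ((pvLookup t a).getD PTrie.nil) w')) c
                = pvLookup t c := by
              rw [pvLookup_pvSet, if_neg hc]
            cases hl2 : pvLookup t c with
            | none =>
                rw [pvSearch_cons_none (hl.trans hl2), pvSearch_cons_none hl2]
                simp [hc]
            | some ch =>
                rw [pvSearch_cons_some (hl.trans hl2), pvSearch_cons_some hl2]
                simp [hc]

-- searching the trie built from '*'-free words ws is list membership in ws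
theorem pvSearch_foldl_aux (ws : List (List Char)) (hws : ∀ w ∈ ws, ('*' : Char) ∉ w)
    (t : PTrie) (ht : pvClean t) (s : List Char) :
    pvSearch (ws.foldl pvAdd t) s = (decide (s ∈ ws) || pvSearch t s) := by
  induction ws generalizing t with
  | nil => simp
  | cons w ws ih =>
      have hw : ('*' : Char) ∉ w := hws w (by simp)
      have hws' : ∀ w' ∈ ws, ('*' : Char) ∉ w' := fun w' h => hws w' (by simp [h])
      simp only [List.foldl_cons]
      rw [ih hws' (pvAdd t w) (pvClean_pvAdd ht hw), pvSearch_pvAdd ht hw]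
      rw [show (decide (s ∈ w :: ws) : Bool) = (decide (s = w) || decide (s ∈ ws)) by
        simp [List.mem_cons]]
      cases decide (s = w) <;> cases decide (s ∈ ws) <;> cases pvSearch t s <;> rfl

theorem pvSearch_build (ws : List String) (hws : ∀ w ∈ ws, ('*' : Char) ∉ w.toList)
    (s : String) :
    pvSearch ((ws.map String.toList).foldl pvAdd PTrie.nil) s.toList = decide (s ∈ ws) := by
  have h := pvSearch_foldl_aux (ws.map String.toList)
      (by intro w hw; obtain ⟨w', hw', rfl⟩ := List.mem_map.1 hw; exact hws w' hw')
      PTrie.nil trivial s.toList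
  rw [h, pvSearch_nil, Bool.or_false, decide_eq_decide]
  constructor
  · intro hm
    obtain ⟨w', hw', he⟩ := List.mem_map.1 hm
    exact (String.toList_inj.mp he) ▸ hw'
  · intro hm
    exact List.mem_map.2 ⟨s, hm, rfl⟩

-- the first n indexed text entries are text.take n.toNat
theorem pv_map_take (text : List String) (n : Int) (hn : n ≤ (text.length : Int)) :
    (PySem.List.pyRange 0 n 1).map (fun i => PySem.List.pyGetD text i "")
      = text.take n.toNat := by
  by_cases h0 : n ≤ 0
  · rw [PySem.List.pyRange_one_eq_nil h0]
    have : n.toNat = 0 := by omega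
    simp [this]
  · have h0' : 0 < n := by omega
    have hn' : n = (n.toNat : Int) := by omega
    have hlen : PySem.List.len (text.take n.toNat) = n := by
      simp [PySem.List.len]; omega
    rw [← PySem.List.map_pyGetD_pyRange_zero (xs := text.take n.toNat) (d := ""), hlen]
    apply List.map_congr_left
    intro i hi
    have hib := (PySem.List.mem_pyRange_one).1 hi
    have h1 : (0 : Int) ≤ i := hib.1
    have h2 : i < n := hib.2
    rw [PySem.List.pyGetD_eq_getElem text "" h1 (by omega),
        PySem.List.pyGetD_eq_getElem (text.take n.toNat) "" h1 (by simp; omega)]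
    rw [List.getElem_take]

-- fold the A-side trie over indices = fold over the taken strings
theorem pv_trie_eq (text : List String) (n : Int) (hn : n ≤ (text.length : Int)) :
    (PySem.List.pyRange 0 n 1).foldl
        (fun t i => pvAdd t (PySem.List.pyGetD text i "").toList) PTrie.nil
      = ((text.take n.toNat).map String.toList).foldl pvAdd PTrie.nil := by
  rw [← pv_map_take text n hn, List.foldl_map, List.foldl_map]

theorem pv_contains_iff (L : List String) (x : String) :
    PySem.Set.contains (PySem.Set.ofList L) x = decide (x ∈ L) := by
  simp [PySem.Set.contains, PySem.Set.mem_ofList]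

theorem pv_foldl_ext {α β : Type} (f g : α → β → α) (l : List β)
    (h : ∀ a b, f a b = g a b) : ∀ a, l.foldl f a = l.foldl g a := by
  induction l with
  | nil => intro a; rfl
  | cons x xs ih => intro a; simp only [List.foldl_cons, h]; exact ih _

-- ===== VERDICT (by name: the statement is the Claim_ definition above) =====
theorem solution_spec : Claim_equal_solution := by
  intro n m text sample _ hpre
  obtain ⟨hn, hm, hstar⟩ := hpre
  simp only [Spec_solution, solution, solution_alt]
  have hws : ∀ w ∈ text.take n.toNat, ('*' : Char) ∉ w.toList := by
    intro w hw
    have := List.all_eq_true.1 hstar w hw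
    simpa using this
  have hsearch : ∀ x : String,
      pvSearch ((PySem.List.pyRange 0 n 1).foldl
        (fun t i => pvAdd t (PySem.List.pyGetD text i "").toList) PTrie.nil) x.toList
      = PySem.Set.contains
          (PySem.Set.ofList ((PySem.List.pyRange 0 n 1).map (fun i => PySem.List.pyGetD text i "")))
          x := by
    intro x
    rw [pv_trie_eq text n hn, pvSearch_build _ hws, pv_map_take text n hn, pv_contains_iff]
  apply pv_foldl_ext
  intro c j
  rw [hsearch]
  split <;> omega
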